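-- pv_equiv track=rewrite | github.com/lc-blip/Interactive_elections_map_G1 | app/ex_parishes_dist_to_mun.py | _read_type_and_rest
-- ===== SOURCE A (Python) =====
-- def _read_type_and_rest(s: str):
--     s = s.lstrip()
--     up = s.upper()
--     for t in ("MULTIPOLYGON", "POLYGON", "GEOMETRYCOLLECTION"):
--         if up.startswith(t):
--             rest = s[len(t):].lstrip()
--             rup = rest.upper()
--             if rup.startswith("ZM"):
--                 rest = rest[2:].lstrip()
--             elif rup[:1] in ("Z", "M"):
--                 rest = rest[1:].lstrip()
--             return t, rest
--     raise ValueError(f"Unsupported WKT type: {s[:40]}")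
-- ===== SOURCE B (Python) =====
-- # Table-driven DFA matcher: the three WKT type names are compiled once into a
-- # transition table; the parser walks the upper-cased string through the automaton
-- # instead of trying startswith against each name.
--
-- def _build():
--     trans = {}
--     accept = {}
--     nxt = 1
--     for word in ("MULTIPOLYGON", "POLYGON", "GEOMETRYCOLLECTION"):
--         st = 0
--         for ch in word:
--             key = (st, ch)
--             if key not in trans:
--                 trans[key] = nxt
--                 nxt += 1
--             st = trans[key]
--         accept[st] = word
--     return trans, accept
--
--
-- _TRANS, _ACCEPT = _build()
--
--
-- def _read_type_and_rest(s: str):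
--     s = s.lstrip()
--     up = s.upper()
--     st = 0
--     i = 0
--     while st not in _ACCEPT:
--         if i >= len(up) or (st, up[i]) not in _TRANS:
--             raise ValueError(f"Unsupported WKT type: {s[:40]}")
--         st = _TRANS[(st, up[i])]
--         i += 1
--     t = _ACCEPT[st]
--     rest = s[i:].lstrip()
--     rup = rest[:2].upper()
--     k = 2 if rup == "ZM" else 1 if rup[:1] in ("Z", "M") else 0
--     if k:
--         rest = rest[k:].lstrip()
--     return t, rest
-- ===== Notes on version B (the rewrite author's own statement) =====
-- stated objective: alternative
-- what changed: Replaces A's startswith scan over the three type names and its ZM/Z/M if/elif over the whole rest with a table-driven DFA: the names are compiled once into a transition/accept table and the parser walks the upper-cased string through the automaton character by character, then decides the modifier from the two-character window rest[:2]; Pre_ excludes exactly the strings without a recognised WKT type prefix, on which both A and B raise ValueError.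
import Mathlib
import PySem

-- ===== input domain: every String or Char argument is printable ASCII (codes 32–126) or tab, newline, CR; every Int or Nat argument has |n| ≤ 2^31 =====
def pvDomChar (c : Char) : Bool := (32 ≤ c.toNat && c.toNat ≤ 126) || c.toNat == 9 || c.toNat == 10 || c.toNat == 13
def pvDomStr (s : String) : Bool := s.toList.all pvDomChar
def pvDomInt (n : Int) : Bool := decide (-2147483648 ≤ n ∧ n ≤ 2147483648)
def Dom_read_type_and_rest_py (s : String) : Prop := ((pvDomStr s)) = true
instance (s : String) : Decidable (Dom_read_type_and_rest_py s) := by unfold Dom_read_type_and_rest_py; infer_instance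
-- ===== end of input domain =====

-- B replaces A's per-name startswith scan with a table-driven DFA: the three WKT type
-- names are compiled once into a transition table and the parser walks the upper-cased
-- string through it character by character; same cost, a different algorithm.
-- Pre_ excludes exactly the inputs on which A raises ValueError (no recognised WKT type prefix).

def pvT_M : List Char := ['M','U','L','T','I','P','O','L','Y','G','O','N']
def pvT_P : List Char := ['P','O','L','Y','G','O','N']
def pvT_G : List Char := ['G','E','O','M','E','T','R','Y','C','O','L','L','E','C','T','I','O','N']

-- ===== PORT A =====
-- the 'for t in (…)' loop of A; ([], []) stands where A raises ValueError (excluded by Pre_)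
def aLoop (s1 up : List Char) : List (List Char) → List Char × List Char
  | [] => ([], [])
  | t :: ts =>
    if PySem.Chars.startswith up t then
      let rest := PySem.Chars.lstrip (PySem.Chars.slice s1 (some (t.length : Int)) none)
      let rup := PySem.Chars.upper rest
      let rest2 :=
        if PySem.Chars.startswith rup ['Z','M'] then
          PySem.Chars.lstrip (PySem.Chars.slice rest (some 2) none)
        else if PySem.Chars.slice rup none (some 1) = ['Z'] ∨ PySem.Chars.slice rup none (some 1) = ['M'] then
          PySem.Chars.lstrip (PySem.Chars.slice rest (some 1) none)
        else rest
      (t, rest2)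
    else aLoop s1 up ts

def read_type_and_rest_py (s : String) : String × String :=
  let s1 := PySem.Chars.lstrip s.toList
  let up := PySem.Chars.upper s1
  let r := aLoop s1 up [pvT_M, pvT_P, pvT_G]
  (String.ofList r.1, String.ofList r.2)

-- ===== PORT B =====
-- _build(): compile the three names into a DFA (transition dict + accepting states)
def bBuildChar (acc : PySem.Dict (Int × Char) Int × Int × Int) (ch : Char) :
    PySem.Dict (Int × Char) Int × Int × Int :=
  let (tns, nxt, st) := acc
  match PySem.Dict.get? tns (st, ch) with
  | none => (PySem.Dict.insert tns (st, ch) nxt, nxt + 1, nxt)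
  | some v => (tns, nxt, v)

def bBuildWord (acc : PySem.Dict (Int × Char) Int × Int × PySem.Dict Int (List Char))
    (w : List Char) :
    PySem.Dict (Int × Char) Int × Int × PySem.Dict Int (List Char) :=
  let (tns, nxt, accept) := acc
  let (tns2, nxt2, st) := w.foldl bBuildChar (tns, nxt, 0)
  (tns2, nxt2, PySem.Dict.insert accept st w)

def pvBuild : PySem.Dict (Int × Char) Int × Int × PySem.Dict Int (List Char) :=
  [pvT_M, pvT_P, pvT_G].foldl bBuildWord (PySem.Dict.empty, 1, PySem.Dict.empty)

def pvTrans : PySem.Dict (Int × Char) Int := pvBuild.1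
def pvAccept : PySem.Dict Int (List Char) := pvBuild.2.2

-- the 'while st not in _ACCEPT' loop of B; none stands where B raises ValueError
def bWalk (st : Int) : List Char → Nat → Option (List Char × Nat)
  | cs, i =>
    match PySem.Dict.get? pvAccept st with
    | some w => some (w, i)
    | none =>
      match cs with
      | [] => none
      | c :: tl =>
        match PySem.Dict.get? pvTrans (st, c) with
        | none => none
        | some st' => bWalk st' tl (i + 1)

def read_type_and_rest_py_alt (s : String) : String × String :=
  let s1 := PySem.Chars.lstrip s.toList
  let up := PySem.Chars.upper s1
  match bWalk 0 up 0 with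
  | none => ("", "")
  | some (t, i) =>
    let rest := PySem.Chars.lstrip (PySem.Chars.slice s1 (some (i : Int)) none)
    let rup := PySem.Chars.upper (PySem.Chars.slice rest none (some 2))
    let k : Int :=
      if rup = ['Z','M'] then 2
      else if PySem.Chars.slice rup none (some 1) = ['Z'] ∨ PySem.Chars.slice rup none (some 1) = ['M'] then 1
      else 0
    let rest2 := if k ≠ 0 then PySem.Chars.lstrip (PySem.Chars.slice rest (some k) none) else rest
    (String.ofList t, String.ofList rest2)

-- ===== PRECONDITION & SPEC =====
-- Pre_: the upper-cased lstripped input starts with one of the three WKT type names;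
-- on every other input A (and B) raises ValueError.
def Pre_read_type_and_rest_py (s : String) : Prop :=
  PySem.Chars.startswith (PySem.Chars.upper (PySem.Chars.lstrip s.toList)) pvT_M = true ∨
  PySem.Chars.startswith (PySem.Chars.upper (PySem.Chars.lstrip s.toList)) pvT_P = true ∨
  PySem.Chars.startswith (PySem.Chars.upper (PySem.Chars.lstrip s.toList)) pvT_G = true
instance (s : String) : Decidable (Pre_read_type_and_rest_py s) := by
  unfold Pre_read_type_and_rest_py; infer_instance

def pvWitness_read_type_and_rest_py : String := " polygon ZM ((0 0, 1 0, 0 0))"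

def Spec_read_type_and_rest_py (s : String) (out : String × String) : Prop := out = read_type_and_rest_py_alt s
instance (s : String) (out : String × String) : Decidable (Spec_read_type_and_rest_py s out) := by unfold Spec_read_type_and_rest_py; infer_instance

-- ===== CLAIM (what is proved, stated in full; the proofs are below) =====
def Claim_equal_read_type_and_rest_py : Prop := ∀ (s : String), Dom_read_type_and_rest_py s → Pre_read_type_and_rest_py s → Spec_read_type_and_rest_py s (read_type_and_rest_py s)

-- ===== LEMMAS AND PROOFS =====

lemma bWalk_step {st st' : Int} {c : Char} {tl : List Char} {i : Nat}
    (h1 : PySem.Dict.get? pvAccept st = none)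
    (h2 : PySem.Dict.get? pvTrans (st, c) = some st') :
    bWalk st (c :: tl) i = bWalk st' tl (i + 1) := by
  conv_lhs => rw [bWalk.eq_def]
  simp only [h1, h2]

lemma bWalk_acc (st : Int) (cs : List Char) (i : Nat) (w : List Char)
    (h : PySem.Dict.get? pvAccept st = some w) :
    bWalk st cs i = some (w, i) := by
  conv_lhs => rw [bWalk.eq_def]
  simp only [h]

lemma walk_M (t : List Char) : bWalk 0 (pvT_M ++ t) 0 = some (pvT_M, 12) := by
  simp only [pvT_M, List.cons_append, List.nil_append]
  rw [bWalk_step (st := 0) (st' := 1) (h1 := by decide) (h2 := by decide)]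
  rw [bWalk_step (st := 1) (st' := 2) (h1 := by decide) (h2 := by decide)]
  rw [bWalk_step (st := 2) (st' := 3) (h1 := by decide) (h2 := by decide)]
  rw [bWalk_step (st := 3) (st' := 4) (h1 := by decide) (h2 := by decide)]
  rw [bWalk_step (st := 4) (st' := 5) (h1 := by decide) (h2 := by decide)]
  rw [bWalk_step (st := 5) (st' := 6) (h1 := by decide) (h2 := by decide)]
  rw [bWalk_step (st := 6) (st' := 7) (h1 := by decide) (h2 := by decide)]
  rw [bWalk_step (st := 7) (st' := 8) (h1 := by decide) (h2 := by decide)]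
  rw [bWalk_step (st := 8) (st' := 9) (h1 := by decide) (h2 := by decide)]
  rw [bWalk_step (st := 9) (st' := 10) (h1 := by decide) (h2 := by decide)]
  rw [bWalk_step (st := 10) (st' := 11) (h1 := by decide) (h2 := by decide)]
  rw [bWalk_step (st := 11) (st' := 12) (h1 := by decide) (h2 := by decide)]
  exact bWalk_acc _ _ _ _ (by decide)

lemma walk_P (t : List Char) : bWalk 0 (pvT_P ++ t) 0 = some (pvT_P, 7) := by
  simp only [pvT_P, List.cons_append, List.nil_append]
  rw [bWalk_step (st := 0) (st' := 13) (h1 := by decide) (h2 := by decide)]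
  rw [bWalk_step (st := 13) (st' := 14) (h1 := by decide) (h2 := by decide)]
  rw [bWalk_step (st := 14) (st' := 15) (h1 := by decide) (h2 := by decide)]
  rw [bWalk_step (st := 15) (st' := 16) (h1 := by decide) (h2 := by decide)]
  rw [bWalk_step (st := 16) (st' := 17) (h1 := by decide) (h2 := by decide)]
  rw [bWalk_step (st := 17) (st' := 18) (h1 := by decide) (h2 := by decide)]
  rw [bWalk_step (st := 18) (st' := 19) (h1 := by decide) (h2 := by decide)]
  exact bWalk_acc _ _ _ _ (by decide)

lemma walk_G (t : List Char) : bWalk 0 (pvT_G ++ t) 0 = some (pvT_G, 18) := by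
  simp only [pvT_G, List.cons_append, List.nil_append]
  rw [bWalk_step (st := 0) (st' := 20) (h1 := by decide) (h2 := by decide)]
  rw [bWalk_step (st := 20) (st' := 21) (h1 := by decide) (h2 := by decide)]
  rw [bWalk_step (st := 21) (st' := 22) (h1 := by decide) (h2 := by decide)]
  rw [bWalk_step (st := 22) (st' := 23) (h1 := by decide) (h2 := by decide)]
  rw [bWalk_step (st := 23) (st' := 24) (h1 := by decide) (h2 := by decide)]
  rw [bWalk_step (st := 24) (st' := 25) (h1 := by decide) (h2 := by decide)]
  rw [bWalk_step (st := 25) (st' := 26) (h1 := by decide) (h2 := by decide)]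
  rw [bWalk_step (st := 26) (st' := 27) (h1 := by decide) (h2 := by decide)]
  rw [bWalk_step (st := 27) (st' := 28) (h1 := by decide) (h2 := by decide)]
  rw [bWalk_step (st := 28) (st' := 29) (h1 := by decide) (h2 := by decide)]
  rw [bWalk_step (st := 29) (st' := 30) (h1 := by decide) (h2 := by decide)]
  rw [bWalk_step (st := 30) (st' := 31) (h1 := by decide) (h2 := by decide)]
  rw [bWalk_step (st := 31) (st' := 32) (h1 := by decide) (h2 := by decide)]
  rw [bWalk_step (st := 32) (st' := 33) (h1 := by decide) (h2 := by decide)]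
  rw [bWalk_step (st := 33) (st' := 34) (h1 := by decide) (h2 := by decide)]
  rw [bWalk_step (st := 34) (st' := 35) (h1 := by decide) (h2 := by decide)]
  rw [bWalk_step (st := 35) (st' := 36) (h1 := by decide) (h2 := by decide)]
  rw [bWalk_step (st := 36) (st' := 37) (h1 := by decide) (h2 := by decide)]
  exact bWalk_acc _ _ _ _ (by decide)



lemma startswith_head_eq {l p q : List Char} {c d : Char}
    (hp : PySem.Chars.startswith l (c :: p) = true)
    (hq : PySem.Chars.startswith l (d :: q) = true) : c = d := by
  rw [PySem.Chars.startswith_iff] at hp hq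
  obtain ⟨t1, h1⟩ := hp
  obtain ⟨t2, h2⟩ := hq
  rw [← h1] at h2
  simp only [List.cons_append] at h2
  injection h2 with hcd _
  exact hcd.symm

lemma startswith_two_iff (l : List Char) (a b : Char) :
    PySem.Chars.startswith l [a, b] = true ↔ l.take 2 = [a, b] := by
  rw [PySem.Chars.startswith_iff]
  cases l with
  | nil => simp
  | cons x tl =>
    cases tl with
    | nil => simp [List.prefix_cons_iff]
    | cons y tl2 =>
      constructor
      · rintro ⟨t, ht⟩
        injection ht with h1 ht; injection ht with h2 _
        simp [h1, h2, List.take]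
      · intro h
        simp only [List.take] at h
        injection h with h1 h; injection h with h2 _
        exact ⟨tl2, by simp [h1, h2]⟩

lemma take_upper (l : List Char) (n : Nat) :
    PySem.Chars.upper (l.take n) = (PySem.Chars.upper l).take n := by
  simp [PySem.Chars.upper, List.map_take]

-- B's suffix computation (over rest[:2]) equals A's if/elif chain (over all of rest)
lemma suffix_eq (rest : List Char) :
    (let rup := PySem.Chars.upper rest
     if PySem.Chars.startswith rup ['Z','M'] then
       PySem.Chars.lstrip (PySem.Chars.slice rest (some 2) none)
     else if PySem.Chars.slice rup none (some 1) = ['Z'] ∨ PySem.Chars.slice rup none (some 1) = ['M'] then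
       PySem.Chars.lstrip (PySem.Chars.slice rest (some 1) none)
     else rest)
    =
    (let rup := PySem.Chars.upper (PySem.Chars.slice rest none (some 2))
     let k : Int :=
       if rup = ['Z','M'] then 2
       else if PySem.Chars.slice rup none (some 1) = ['Z'] ∨ PySem.Chars.slice rup none (some 1) = ['M'] then 1
       else 0
     if k ≠ 0 then PySem.Chars.lstrip (PySem.Chars.slice rest (some k) none) else rest) := by
  have hsl2 : PySem.Chars.slice rest none (some 2) = rest.take 2 := by
    simp only [PySem.Chars.slice_eq_listSlice]
    rw [PySem.List.slice_to rest (by norm_num : (0:Int) ≤ 2)]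
    rfl
  have hup2 : PySem.Chars.upper (PySem.Chars.slice rest none (some 2))
      = (PySem.Chars.upper rest).take 2 := by
    rw [hsl2, take_upper]
  have htake1 : PySem.Chars.slice ((PySem.Chars.upper rest).take 2) none (some 1)
      = PySem.Chars.slice (PySem.Chars.upper rest) none (some 1) := by
    simp only [PySem.Chars.slice_eq_listSlice]
    rw [PySem.List.slice_to _ (by norm_num : (0:Int) ≤ 1),
        PySem.List.slice_to _ (by norm_num : (0:Int) ≤ 1)]
    rw [List.take_take]
    rfl
  have hzm : (PySem.Chars.upper rest).take 2 = ['Z','M'] ↔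
      PySem.Chars.startswith (PySem.Chars.upper rest) ['Z','M'] = true :=
    (startswith_two_iff _ 'Z' 'M').symm
  simp only [hup2, htake1]
  by_cases h1 : PySem.Chars.startswith (PySem.Chars.upper rest) ['Z','M'] = true
  · simp only [h1, hzm.mpr h1, if_pos]
    norm_num
  · have hne : ¬ (PySem.Chars.upper rest).take 2 = ['Z','M'] := fun h => h1 (hzm.mp h)
    simp only [h1, hne, Bool.false_eq_true, if_false]
    by_cases h2 : PySem.Chars.slice (PySem.Chars.upper rest) none (some 1) = ['Z'] ∨
        PySem.Chars.slice (PySem.Chars.upper rest) none (some 1) = ['M']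
    · simp only [h2, if_pos]
      norm_num
    · simp only [h2, if_false]
      norm_num

-- ===== VERDICT (by name: the statement is the Claim_ definition above) =====
theorem read_type_and_rest_py_spec : Claim_equal_read_type_and_rest_py := by
  intro s _ hPre
  unfold Spec_read_type_and_rest_py read_type_and_rest_py read_type_and_rest_py_alt
  rcases hPre with h | h | h
  · -- MULTIPOLYGON
    obtain ⟨t, ht⟩ := (PySem.Chars.startswith_iff _ _).mp h
    simp only [aLoop, pvT_M] at h ⊢
    rw [← ht, walk_M]
    simp only [pvT_M]
    exact congrArg (fun r => (String.ofList pvT_M, String.ofList r)) (suffix_eq _)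
  · -- POLYGON
    have hM : ¬ PySem.Chars.startswith (PySem.Chars.upper (PySem.Chars.lstrip s.toList)) pvT_M = true := by
      intro hm
      have := startswith_head_eq (p := pvT_M.tail) (q := pvT_P.tail) hm h
      simp at this
    obtain ⟨t, ht⟩ := (PySem.Chars.startswith_iff _ _).mp h
    simp only [aLoop, pvT_M, pvT_P] at h hM ⊢
    rw [if_neg hM, ← ht, walk_P]
    simp only [pvT_P]
    exact congrArg (fun r => (String.ofList pvT_P, String.ofList r)) (suffix_eq _)
  · -- GEOMETRYCOLLECTION
    have hM : ¬ PySem.Chars.startswith (PySem.Chars.upper (PySem.Chars.lstrip s.toList)) pvT_M = true := by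
      intro hm
      have := startswith_head_eq (p := pvT_M.tail) (q := pvT_G.tail) hm h
      simp at this
    have hP : ¬ PySem.Chars.startswith (PySem.Chars.upper (PySem.Chars.lstrip s.toList)) pvT_P = true := by
      intro hp
      have := startswith_head_eq (p := pvT_P.tail) (q := pvT_G.tail) hp h
      simp at this
    obtain ⟨t, ht⟩ := (PySem.Chars.startswith_iff _ _).mp h
    simp only [aLoop, pvT_M, pvT_P, pvT_G] at h hM hP ⊢
    rw [if_neg hM, if_neg hP, ← ht, walk_G]
    simp only [pvT_G]
    exact congrArg (fun r => (String.ofList pvT_G, String.ofList r)) (suffix_eq _)
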